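-- pv_equiv track=rewrite | github.com/Kehvarl/AdventoOfCode2024 | day21/pt1.py | robo_keypad
-- ===== SOURCE A (Python) =====
-- keypad2 = {
--     "A": (2, 0),
--     "^": (1, 0),
--     ">": (2, 1),
--     "v": (1, 1),
--     "<": (0, 1),
-- }
--
-- keypad2_best_moves = {
--     (2, 0): {
--         (2, 0): [],                     # A => A
--         (1, 0): ["<"],                # A => ^
--         (2, 1): ["v"],                # A => >
--         (1, 1): ["<", "v"],           # A => v
--         (0, 1): ["v", "<", "<"]},     # A => <
--     (1, 0): {
--         (2, 0): [">"],                # ^ -> A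
--         (1, 0): [],                     # ^ -> ^
--         (2, 1): ["v", ">"],           # ^ -> >
--         (1, 1): ["v"],                # ^ -> v
--         (0, 1): ["v", "<"]},          # ^ -> <
--     (2, 1): {
--         (2, 0): ["^"],                # > -> A
--         (1, 0): ["<", "^"],           # > -> ^
--         (2, 1): [],                     # > -> >
--         (1, 1): ["<"],                # > -> v
--         (0, 1): ["<", "<"]},          # > -> <
--     (1, 1): {
--         (2, 0): ["^", ">"],           # v -> A
--         (1, 0): ["^"],                # v -> ^
--         (2, 1): [">"],                # v -> >
--         (1, 1): [],                     # v -> v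
--         (0, 1): ["<"]},               # v -> <
--     (0, 1): {
--         (2, 0): [">", ">", "^"],        # < -> A
--         (1, 0): [">", "^"],             # < -> ^
--         (2, 1): [">", ">"],             # < -> >
--         (1, 1): [">"],                  # < -> v
--         (0, 1): []}                     # < -> <
-- }
--
-- def robo_keypad(moves, kx=2, ky=0):
--     out = []
--     for move in moves:
--         mx, my = keypad2[move]
--         if (kx, ky) != (mx, my):
--             out.extend(keypad2_best_moves[(kx, ky)][(mx, my)])
--             (kx, ky) = (mx, my)
--         out.append("A")
--     return out
-- ===== SOURCE B (Python) =====
-- keypad2 = {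
--     "A": (2, 0),
--     "^": (1, 0),
--     ">": (2, 1),
--     "v": (1, 1),
--     "<": (0, 1),
-- }
--
-- def robo_keypad(moves, kx=2, ky=0):
--     out = []
--     for move in moves:
--         mx, my = keypad2[move]
--         dx, dy = mx - kx, my - ky
--         if (dx, dy) != (0, 0):
--             h = ("<" if dx < 0 else ">") * abs(dx)
--             v = ("^" if dy < 0 else "v") * abs(dy)
--             if dx < 0:
--                 seq = v + h if (ky == 0 and mx == 0) else h + v
--             else:
--                 seq = h + v if (kx == 0 and my == 0) else v + h
--             out.extend(list(seq))
--             kx, ky = mx, my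
--         out.append("A")
--     return out
-- ===== Notes on version B (the rewrite author's own statement) =====
-- stated objective: simpler
-- what changed: B replaces the hard-coded 25-entry keypad2_best_moves table with arithmetic on the position delta (repeat '<'/'>' |dx| times and '^'/'v' |dy| times, ordered horizontal-first when moving left and vertical-first otherwise, with the two gap-avoidance overrides), keeping only the 5-entry key->position map.
import Mathlib
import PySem

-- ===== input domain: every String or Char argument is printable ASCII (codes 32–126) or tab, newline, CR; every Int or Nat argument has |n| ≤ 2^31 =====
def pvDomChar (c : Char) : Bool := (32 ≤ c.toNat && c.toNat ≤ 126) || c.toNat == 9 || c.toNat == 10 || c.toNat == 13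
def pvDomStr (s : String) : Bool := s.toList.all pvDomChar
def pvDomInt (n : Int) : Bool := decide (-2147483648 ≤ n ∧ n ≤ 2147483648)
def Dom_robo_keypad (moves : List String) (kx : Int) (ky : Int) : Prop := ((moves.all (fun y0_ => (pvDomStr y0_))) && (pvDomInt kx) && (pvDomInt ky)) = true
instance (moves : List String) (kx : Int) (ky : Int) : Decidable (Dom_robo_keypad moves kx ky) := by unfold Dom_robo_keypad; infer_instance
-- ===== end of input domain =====

-- B replaces A's hard-coded 25-entry best-moves table by arithmetic on the position delta
-- (objective: simpler; same O(n) cost; return value only, neither mutates its arguments).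

-- ===== PORT A =====
def keypad2 : PySem.Dict String (Int × Int) := PySem.Dict.ofList
  [("A", (2, 0)), ("^", (1, 0)), (">", (2, 1)), ("v", (1, 1)), ("<", (0, 1))]

def keypad2_best_moves : PySem.Dict (Int × Int) (PySem.Dict (Int × Int) (List String)) := PySem.Dict.ofList
  [((2, 0), PySem.Dict.ofList [((2, 0), []), ((1, 0), ["<"]), ((2, 1), ["v"]), ((1, 1), ["<", "v"]), ((0, 1), ["v", "<", "<"])]),
   ((1, 0), PySem.Dict.ofList [((2, 0), [">"]), ((1, 0), []), ((2, 1), ["v", ">"]), ((1, 1), ["v"]), ((0, 1), ["v", "<"])]),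
   ((2, 1), PySem.Dict.ofList [((2, 0), ["^"]), ((1, 0), ["<", "^"]), ((2, 1), []), ((1, 1), ["<"]), ((0, 1), ["<", "<"])]),
   ((1, 1), PySem.Dict.ofList [((2, 0), ["^", ">"]), ((1, 0), ["^"]), ((2, 1), [">"]), ((1, 1), []), ((0, 1), ["<"])]),
   ((0, 1), PySem.Dict.ofList [((2, 0), [">", ">", "^"]), ((1, 0), [">", "^"]), ((2, 1), [">", ">"]), ((1, 1), [">"]), ((0, 1), [])])]

-- KeyError in Python (move not a key, or an unknown (kx,ky) position) is excluded by Pre_;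
-- the port keeps the state unchanged / falls back to [] there.
def robo_keypad (moves : List String) (kx : Int) (ky : Int) : List String :=
  (moves.foldl
    (fun (st : List String × Int × Int) move =>
      let out := st.1; let kx := st.2.1; let ky := st.2.2
      match PySem.Dict.get? keypad2 move with
      | none => (out, kx, ky)  -- KeyError, outside Pre_
      | some (mx, my) =>
        if (kx, ky) ≠ (mx, my) then
          let seq := ((PySem.Dict.get? keypad2_best_moves (kx, ky)).bind
                        (fun d => PySem.Dict.get? d (mx, my))).getD []  -- none = KeyError, outside Pre_
          (out ++ seq ++ ["A"], mx, my)
        else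
          (out ++ ["A"], kx, ky))
    ([], kx, ky)).1

-- ===== PORT B =====
def robo_keypad_alt (moves : List String) (kx : Int) (ky : Int) : List String :=
  (moves.foldl
    (fun (st : List String × Int × Int) move =>
      let out := st.1; let kx := st.2.1; let ky := st.2.2
      match PySem.Dict.get? keypad2 move with
      | none => (out, kx, ky)  -- KeyError, outside Pre_
      | some (mx, my) =>
        let dx := mx - kx; let dy := my - ky
        if (dx, dy) ≠ ((0 : Int), (0 : Int)) then
          let h := List.replicate dx.natAbs (if dx < 0 then "<" else ">")
          let v := List.replicate dy.natAbs (if dy < 0 then "^" else "v")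
          let seq := if dx < 0 then (if ky = 0 ∧ mx = 0 then v ++ h else h ++ v)
                     else (if kx = 0 ∧ my = 0 then h ++ v else v ++ h)
          (out ++ seq ++ ["A"], mx, my)
        else
          (out ++ ["A"], kx, ky))
    ([], kx, ky)).1

-- ===== PRECONDITION & SPEC =====
def pvValidPos : List (Int × Int) := [(2, 0), (1, 0), (2, 1), (1, 1), (0, 1)]

-- Pre_ excludes exactly the inputs where Python A raises KeyError: a move outside the
-- five keypad buttons, or a nonempty move list starting from an unknown (kx,ky) position.
def Pre_robo_keypad (moves : List String) (kx : Int) (ky : Int) : Prop :=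
  (∀ m ∈ moves, m ∈ ["A", "^", ">", "v", "<"]) ∧ (moves = [] ∨ (kx, ky) ∈ pvValidPos)
instance (moves : List String) (kx : Int) (ky : Int) : Decidable (Pre_robo_keypad moves kx ky) := by
  unfold Pre_robo_keypad; infer_instance

def pvWitness_robo_keypad : List String × Int × Int := (["<", "A", "v"], 2, 0)

def Spec_robo_keypad (moves : List String) (kx : Int) (ky : Int) (out : List String) : Prop := out = robo_keypad_alt moves kx ky
instance (moves : List String) (kx : Int) (ky : Int) (out : List String) : Decidable (Spec_robo_keypad moves kx ky out) := by unfold Spec_robo_keypad; infer_instance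

-- ===== CLAIM (what is proved, stated in full; the proofs are below) =====
def Claim_equal_robo_keypad : Prop := ∀ (moves : List String) (kx : Int) (ky : Int), Dom_robo_keypad moves kx ky → Pre_robo_keypad moves kx ky → Spec_robo_keypad moves kx ky (robo_keypad moves kx ky)

-- ===== LEMMAS AND PROOFS =====

-- the step functions of the two folds
def pvStepA (st : List String × Int × Int) (move : String) : List String × Int × Int :=
  let out := st.1; let kx := st.2.1; let ky := st.2.2
  match PySem.Dict.get? keypad2 move with
  | none => (out, kx, ky)
  | some (mx, my) =>
    if (kx, ky) ≠ (mx, my) then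
      let seq := ((PySem.Dict.get? keypad2_best_moves (kx, ky)).bind
                    (fun d => PySem.Dict.get? d (mx, my))).getD []
      (out ++ seq ++ ["A"], mx, my)
    else
      (out ++ ["A"], kx, ky)

def pvStepB (st : List String × Int × Int) (move : String) : List String × Int × Int :=
  let out := st.1; let kx := st.2.1; let ky := st.2.2
  match PySem.Dict.get? keypad2 move with
  | none => (out, kx, ky)
  | some (mx, my) =>
    let dx := mx - kx; let dy := my - ky
    if (dx, dy) ≠ ((0 : Int), (0 : Int)) then
      let h := List.replicate dx.natAbs (if dx < 0 then "<" else ">")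
      let v := List.replicate dy.natAbs (if dy < 0 then "^" else "v")
      let seq := if dx < 0 then (if ky = 0 ∧ mx = 0 then v ++ h else h ++ v)
                 else (if kx = 0 ∧ my = 0 then h ++ v else v ++ h)
      (out ++ seq ++ ["A"], mx, my)
    else
      (out ++ ["A"], kx, ky)

theorem robo_eq_foldA (moves : List String) (kx ky : Int) :
    robo_keypad moves kx ky = (moves.foldl pvStepA ([], kx, ky)).1 := rfl

theorem robo_alt_eq_foldB (moves : List String) (kx ky : Int) :
    robo_keypad_alt moves kx ky = (moves.foldl pvStepB ([], kx, ky)).1 := rfl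

-- each step only appends to out; factor the appended part out
theorem pvStepA_shift (out : List String) (kx ky : Int) (m : String) :
    pvStepA (out, kx, ky) m =
      (out ++ (pvStepA ([], kx, ky) m).1, (pvStepA ([], kx, ky) m).2) := by
  unfold pvStepA
  cases PySem.Dict.get? keypad2 m with
  | none => simp
  | some p =>
    obtain ⟨mx, my⟩ := p
    by_cases h : ((kx, ky) : Int × Int) = (mx, my) <;> simp [h]

theorem pvStepB_shift (out : List String) (kx ky : Int) (m : String) :
    pvStepB (out, kx, ky) m =
      (out ++ (pvStepB ([], kx, ky) m).1, (pvStepB ([], kx, ky) m).2) := by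
  unfold pvStepB
  cases PySem.Dict.get? keypad2 m with
  | none => simp
  | some p =>
    obtain ⟨mx, my⟩ := p
    by_cases h : ((mx - kx, my - ky) : Int × Int) = (0, 0) <;> simp [h]

-- the 25 valid (position, move) combinations agree, and stay on the keypad
theorem pvStep_nil_eq : ∀ p ∈ pvValidPos, ∀ m ∈ ["A", "^", ">", "v", "<"],
    pvStepA ([], p.1, p.2) m = pvStepB ([], p.1, p.2) m ∧
      (pvStepA ([], p.1, p.2) m).2 ∈ pvValidPos := by decide

-- per-step agreement on valid positions and moves, with a generic out prefix
theorem pvStep_eq (out : List String) (kx ky : Int)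
    (hp : (kx, ky) ∈ pvValidPos) (m : String) (hm : m ∈ ["A", "^", ">", "v", "<"]) :
    pvStepA (out, kx, ky) m = pvStepB (out, kx, ky) m ∧
      (pvStepA (out, kx, ky) m).2 ∈ pvValidPos := by
  have h := pvStep_nil_eq (kx, ky) hp m hm
  rw [pvStepA_shift, pvStepB_shift, h.1]
  exact ⟨rfl, by rw [← h.1]; exact h.2⟩

-- fold agreement from the invariant
theorem pvFold_eq (moves : List String) (out : List String) (kx ky : Int)
    (hp : (kx, ky) ∈ pvValidPos) (hm : ∀ m ∈ moves, m ∈ ["A", "^", ">", "v", "<"]) :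
    moves.foldl pvStepA (out, kx, ky) = moves.foldl pvStepB (out, kx, ky) := by
  induction moves generalizing out kx ky with
  | nil => rfl
  | cons m ms ih =>
    have h := pvStep_eq out kx ky hp m (hm m (List.mem_cons_self))
    simp only [List.foldl_cons]
    rw [← h.1]
    have h2 := h.2
    rcases hA : pvStepA (out, kx, ky) m with ⟨o', kx', ky'⟩
    rw [hA] at h2
    exact ih o' kx' ky' h2 (fun x hx => hm x (List.mem_cons_of_mem _ hx))

-- ===== VERDICT (by name: the statement is the Claim_ definition above) =====
theorem robo_keypad_spec : Claim_equal_robo_keypad := by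
  intro moves kx ky _ hpre
  obtain ⟨hm, hpos⟩ := hpre
  unfold Spec_robo_keypad
  rcases hpos with h | h
  · subst h; rfl
  · rw [robo_eq_foldA, robo_alt_eq_foldB, pvFold_eq moves [] kx ky h hm]
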